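-- pv_equiv track=rewrite | github.com/wikimedia/operations-cookbooks | cookbooks/wmcs/openstack/restart_openstack.py | consolidate_restart_list
-- ===== SOURCE A (Python) =====
-- def consolidate_restart_list(restart_list):
--     """We want to make only one call per host. Fortunately, systemctl takes a list."""
--     restart_dict = {}
--     for pair in restart_list:
--         if pair[0] not in restart_dict:
--             restart_dict[pair[0]] = [pair[1]]
--         else:
--             restart_dict[pair[0]].append(pair[1])
--     return restart_dict
-- ===== SOURCE B (Python) =====
-- def consolidate_restart_list(restart_list):
--     """We want to make only one call per host. Fortunately, systemctl takes a list."""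
--     hosts = []
--     seen = set()
--     for pair in restart_list:
--         if pair[0] not in seen:
--             seen.add(pair[0])
--             hosts.append(pair[0])
--     return {host: [pair[1] for pair in restart_list if pair[0] == host]
--             for host in hosts}
-- ===== Notes on version B (the rewrite author's own statement) =====
-- stated objective: alternative
-- what changed: Replaces the single accumulating dict pass with an index-then-gather pair of passes: first collect the distinct hosts in first-appearance order, then build each host's service list by filtering the input again.
import Mathlib
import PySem

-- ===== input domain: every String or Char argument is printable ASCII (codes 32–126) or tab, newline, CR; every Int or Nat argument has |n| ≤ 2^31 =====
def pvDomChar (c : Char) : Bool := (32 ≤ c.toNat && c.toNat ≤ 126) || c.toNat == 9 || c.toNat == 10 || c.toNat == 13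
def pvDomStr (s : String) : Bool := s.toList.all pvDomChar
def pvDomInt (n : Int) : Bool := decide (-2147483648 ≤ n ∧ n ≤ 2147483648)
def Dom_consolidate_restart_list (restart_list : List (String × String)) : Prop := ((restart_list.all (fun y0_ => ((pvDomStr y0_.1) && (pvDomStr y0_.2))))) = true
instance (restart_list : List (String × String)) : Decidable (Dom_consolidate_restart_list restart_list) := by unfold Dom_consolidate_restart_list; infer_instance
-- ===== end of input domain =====

-- B replaces A's single accumulating dict pass with collect-distinct-hosts then gather-per-host nested passes (alternative decomposition, same result).


-- ===== PORT A =====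
-- for pair in restart_list: if pair[0] not in restart_dict: restart_dict[pair[0]] = [pair[1]] else: restart_dict[pair[0]].append(pair[1])
def consolidate_restart_list (restart_list : List (String × String)) : List (String × List String) :=
  (restart_list.foldl
    (fun d pair =>
      if d.contains pair.1 = false then d.insert pair.1 [pair.2]
      else d.modify pair.1 [] (fun l => l ++ [pair.2]))
    (PySem.Dict.empty : PySem.Dict String (List String))).items

-- ===== PORT B =====
-- hosts = distinct first elements in first-appearance order (the seen-set loop is PySem.Set.ofList);
-- then a dict comprehension over hosts, each value gathered by filtering restart_list again.
def consolidate_restart_list_alt (restart_list : List (String × String)) : List (String × List String) :=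
  (PySem.Set.ofList (restart_list.map (·.1))).map
    (fun host => (host, (restart_list.filter (fun pair => pair.1 == host)).map (·.2)))

-- ===== PRECONDITION & SPEC =====
def Spec_consolidate_restart_list (restart_list : List (String × String)) (out : List (String × List String)) : Prop := out = consolidate_restart_list_alt restart_list
instance (restart_list : List (String × String)) (out : List (String × List String)) : Decidable (Spec_consolidate_restart_list restart_list out) := by unfold Spec_consolidate_restart_list; infer_instance

-- ===== CLAIM (what is proved, stated in full; the proofs are below) =====
def Claim_equal_consolidate_restart_list : Prop := ∀ (restart_list : List (String × String)), Dom_consolidate_restart_list restart_list → Spec_consolidate_restart_list restart_list (consolidate_restart_list restart_list)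

-- ===== LEMMAS AND PROOFS =====

-- A's branch 'insert a fresh key with [v]' is the modify step on a fresh key.
theorem insert_eq_modify_of_not_contains {κ ν : Type} [BEq κ] [LawfulBEq κ]
    (d : PySem.Dict κ (List ν)) (k : κ) (v : ν)
    (h : d.contains k = false) :
    d.insert k [v] = d.modify k ([] : List ν) (fun l => l ++ [v]) := by
  simp [PySem.Dict.modify, PySem.Dict.getD_of_not_contains, h]

theorem a_foldl_eq_modify_foldl (restart_list : List (String × String)) :
    restart_list.foldl
      (fun d pair =>
        if d.contains pair.1 = false then d.insert pair.1 [pair.2]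
        else d.modify pair.1 [] (fun l => l ++ [pair.2]))
      (PySem.Dict.empty : PySem.Dict String (List String))
    = restart_list.foldl
        (fun d pair => d.modify pair.1 [] (fun l => l ++ [pair.2]))
        (PySem.Dict.empty : PySem.Dict String (List String)) := by
  have hstep : (fun (d : PySem.Dict String (List String)) (pair : String × String) =>
      if d.contains pair.1 = false then d.insert pair.1 [pair.2]
      else d.modify pair.1 [] (fun l => l ++ [pair.2]))
    = (fun (d : PySem.Dict String (List String)) (pair : String × String) =>
      d.modify pair.1 [] (fun l => l ++ [pair.2])) := by
    funext d pair
    by_cases h : d.contains pair.1 = false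
    · simp [h, insert_eq_modify_of_not_contains d pair.1 pair.2 h]
    · simp [h]
  rw [hstep]

-- ===== VERDICT (by name: the statement is the Claim_ definition above) =====
theorem consolidate_restart_list_spec : Claim_equal_consolidate_restart_list := by
  intro restart_list _
  unfold Spec_consolidate_restart_list consolidate_restart_list consolidate_restart_list_alt
  rw [a_foldl_eq_modify_foldl]
  set d := restart_list.foldl
      (fun d pair => d.modify pair.1 [] (fun l => l ++ [pair.2]))
      (PySem.Dict.empty : PySem.Dict String (List String)) with hd
  have hnd : d.keys.Nodup := by
    rw [hd]
    exact PySem.Dict.nodup_keys_foldl_modify_key restart_list Prod.fst []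
      (fun d p => fun l => l ++ [p.2]) PySem.Dict.empty PySem.Dict.nodup_keys_empty
  have hkeys : d.keys = PySem.Set.ofList (restart_list.map (·.1)) := by
    rw [hd]
    rw [PySem.Dict.keys_foldl_modify_key]
    simp [PySem.Set.update_nil_left, PySem.Dict.keys_empty]
  have hget : ∀ c, d.getD c [] = (restart_list.filter (fun p => p.1 == c)).map (·.2) := by
    intro c
    rw [hd, PySem.Dict.getD_foldl_modify_append]
    simp [PySem.Dict.getD_empty]
  rw [PySem.Dict.items_eq_map_keys d hnd ([] : List String), hkeys]
  exact List.map_congr_left (fun host _ => by rw [hget host])
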